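-- pv_equiv track=rewrite | github.com/Jmw150/godel_numbers | godel_num.py | p_index
-- ===== SOURCE A (Python) =====
-- def is_prime(p) :
--     "predicate function checking for primeness of input"
--
--     if not (p in [2,3,5,7,11,13]) and p < 14:
--         return False
--
--     # classic sieve of Eratosthenes
--     n = 2
--     while n**2 <= p :
--         if p % n == 0 :
--             return False
--         n += 1
--
--     return True
--
-- def next_prime(p) :
--     "returns the prime after the input"
--
--     p += 1
--     while not is_prime(p) :
--         p += 1
--
--     return p
--
-- def p_index(p) :
--     "index of a prime in the set of primes"
--
--     prime = 2
--     index = 1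
--     while prime < p :
--         prime = next_prime(prime)
--         index += 1
--
--     if p == prime :
--         return index
--     else :
--         return -1
-- ===== SOURCE B (Python) =====
-- def p_index(p):
--     "index of a prime in the set of primes"
--     primes = []
--     for n in range(2, p + 1):
--         if all(n % q for q in primes if q * q <= n):
--             primes.append(n)
--     if primes and primes[-1] == p:
--         return len(primes)
--     return -1
-- ===== Notes on version B (the rewrite author's own statement) =====
-- stated objective: alternative
-- what changed: Replaces A's chained next_prime/is_prime while-loop search (trial division by every integer, with an ad-hoc small-prime table) by one bounded pass 2..p that keeps the list of primes found so far and tests each candidate only against the stored primes up to its square root, then reads the answer off the list's length and last element.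
import Mathlib
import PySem

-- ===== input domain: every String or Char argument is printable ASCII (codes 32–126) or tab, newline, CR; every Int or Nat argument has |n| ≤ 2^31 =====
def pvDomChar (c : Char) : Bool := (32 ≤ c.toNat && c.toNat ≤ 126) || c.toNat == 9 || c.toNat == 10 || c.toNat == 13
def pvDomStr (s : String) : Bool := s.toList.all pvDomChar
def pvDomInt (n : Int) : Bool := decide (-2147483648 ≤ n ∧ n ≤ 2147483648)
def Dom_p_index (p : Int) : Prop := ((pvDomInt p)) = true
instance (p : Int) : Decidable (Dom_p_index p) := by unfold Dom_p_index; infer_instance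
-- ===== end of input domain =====

-- B replaces A's chained next_prime/is_prime searches by a single bounded pass that keeps
-- the list of primes found so far and divides only by those (objective: alternative).

-- ===== PORT A =====
-- inner `while n**2 <= p` of is_prime; n starts at 2 and only increases, kept as a Nat
def isPrimeLoop (p : Int) (n : Nat) : Bool :=
  if h : (n : Int) * n ≤ p then
    if PySem.Int.mod p n = 0 then false else isPrimeLoop p (n + 1)
  else true
termination_by p.toNat + 2 - n
decreasing_by
  have hn : (n : Int) ≤ p ∨ n = 0 := by
    rcases Nat.eq_zero_or_pos n with h0 | h1
    · right; exact h0
    · left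
      have h1' : (1 : Int) ≤ (n : Int) := by exact_mod_cast h1
      nlinarith [h1']
  omega

def is_prime (p : Int) : Bool :=
  if p ∉ ([2, 3, 5, 7, 11, 13] : List Int) ∧ p < 14 then false
  else isPrimeLoop p 2

-- `while not is_prime(p): p += 1` of next_prime; the fuel is a bound never reached
-- (a prime always lies below it, by Bertrand's postulate — proved in the lemmas below)
def nextPrimeLoop : Nat → Int → Int
  | 0, p => p
  | f + 1, p => if is_prime p then p else nextPrimeLoop f (p + 1)

def next_prime (p : Int) : Int := nextPrimeLoop (2 * (p + 1).toNat + 4) (p + 1)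

theorem nextPrimeLoop_ge (f : Nat) : ∀ p : Int, p ≤ nextPrimeLoop f p := by
  induction f with
  | zero => intro p; simp [nextPrimeLoop]
  | succ f ih =>
    intro p
    simp only [nextPrimeLoop]
    split
    · exact le_refl p
    · exact le_trans (by omega) (ih (p + 1))

theorem next_prime_gt (p : Int) : p < next_prime p :=
  lt_of_lt_of_le (by omega) (nextPrimeLoop_ge _ (p + 1))

-- main `while prime < p` loop of p_index
def pIndexLoop (p prime index : Int) : Int :=
  if prime < p then pIndexLoop p (next_prime prime) (index + 1)
  else if p = prime then index else -1
termination_by (p - prime).toNat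
decreasing_by
  have := next_prime_gt prime
  omega

def p_index (p : Int) : Int := pIndexLoop p 2 1

-- ===== PORT B =====
-- body of B's for-loop: trial division of n by the stored primes q with q*q <= n
def bStep (primes : List Int) (n : Int) : List Int :=
  if (primes.filter (fun q => decide (q * q ≤ n))).all (fun q => PySem.Int.mod n q != 0)
  then primes ++ [n] else primes

def p_index_alt (p : Int) : Int :=
  let primes := (PySem.List.pyRange 2 (p + 1) 1).foldl bStep []
  match primes.getLast? with
  | some q => if q = p then PySem.List.len primes else -1
  | none => -1

-- ===== PRECONDITION & SPEC =====
def Spec_p_index (p : Int) (out : Int) : Prop := out = p_index_alt p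
instance (p : Int) (out : Int) : Decidable (Spec_p_index p out) := by unfold Spec_p_index; infer_instance

-- ===== CLAIM (what is proved, stated in full; the proofs are below) =====
def Claim_equal_p_index : Prop := ∀ (p : Int), Dom_p_index p → Spec_p_index p (p_index p)

-- ===== LEMMAS AND PROOFS =====

-- the list of primes below k, as Ints, in increasing order
def PL (k : Nat) : List Int :=
  ((List.range k).filter (fun m => decide (Nat.Prime m))).map Int.ofNat

theorem PL_succ (m : Nat) :
    PL (m + 1) = PL m ++ (if Nat.Prime m then [(m : Int)] else []) := by
  unfold PL
  rw [List.range_succ, List.filter_append, List.map_append]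
  by_cases h : Nat.Prime m <;> simp [h]

theorem mem_PL {q : Int} {k : Nat} (h : q ∈ PL k) :
    ∃ r : Nat, r.Prime ∧ r < k ∧ q = (r : Int) := by
  unfold PL at h
  rcases List.mem_map.mp h with ⟨r, hr, rfl⟩
  rcases List.mem_filter.mp hr with ⟨hrange, hp⟩
  exact ⟨r, by simpa using hp, by simpa using List.mem_range.mp hrange, rfl⟩

theorem PL_mem_of_prime {r k : Nat} (hp : r.Prime) (hk : r < k) : (r : Int) ∈ PL k := by
  unfold PL
  exact List.mem_map.mpr ⟨r, List.mem_filter.mpr ⟨List.mem_range.mpr hk, by simpa using hp⟩, rfl⟩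

-- the common semantic value of both programs
theorem isPrimeLoop_iff (p : Int) (n : Nat) :
    isPrimeLoop p n = true ↔ ∀ m : Nat, n ≤ m → (m : Int) * m ≤ p → ¬ ((m : Int) ∣ p) := by
  induction n using isPrimeLoop.induct (p := p) with
  | case1 n h hmod =>
    rw [isPrimeLoop]
    simp only [dif_pos h, if_pos hmod, Bool.false_eq_true, false_iff]
    push Not
    exact ⟨n, le_refl n, h, (PySem.Int.mod_eq_zero_iff_dvd p n).mp hmod⟩
  | case2 n h hmod ih =>
    rw [isPrimeLoop]
    rw [dif_pos h, if_neg hmod, ih]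
    constructor
    · intro hall m hm hsq
      rcases Nat.lt_or_ge n m with hlt | hge
      · exact hall m hlt hsq
      · have : m = n := by omega
        subst this
        intro hd
        exact hmod ((PySem.Int.mod_eq_zero_iff_dvd p m).mpr hd)
    · intro hall m hm hsq
      exact hall m (by omega) hsq
  | case3 n h =>
    rw [isPrimeLoop]
    simp only [dif_neg h, true_iff]
    intro m hm hsq
    exfalso
    apply h
    have hnm : (n : Int) ≤ (m : Int) := by exact_mod_cast hm
    have h0 : (0 : Int) ≤ (n : Int) := Int.natCast_nonneg n
    nlinarith

theorem isPrime_iff (p : Int) : is_prime p = true ↔ 2 ≤ p ∧ p.toNat.Prime := by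
  unfold is_prime
  split_ifs with hg
  · simp only [false_iff]
    rintro ⟨hp2, hpr⟩
    obtain ⟨hnotmem, hlt⟩ := hg
    apply hnotmem
    interval_cases p <;> revert hpr <;> decide
  · rw [isPrimeLoop_iff]
    push Not at hg
    have hp2 : 2 ≤ p := by
      by_cases hmem : p ∈ ([2, 3, 5, 7, 11, 13] : List Int)
      · simp only [List.mem_cons, List.not_mem_nil, or_false] at hmem
        rcases hmem with h | h | h | h | h | h <;> omega
      · have := hg hmem; omega
    have hpn : p = ((p.toNat : Nat) : Int) := by omega
    constructor
    · intro hall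
      refine ⟨hp2, ?_⟩
      rw [Nat.prime_def_le_sqrt]
      refine ⟨by omega, ?_⟩
      intro m hm hsqrt hdvd
      have hsq : m * m ≤ p.toNat := Nat.le_sqrt.mp hsqrt
      refine hall m hm ?_ ?_
      · rw [hpn]; exact_mod_cast hsq
      · rw [hpn]; exact_mod_cast hdvd
    · rintro ⟨_, hpr⟩ m hm hsq hdvd
      have hdvd' : m ∣ p.toNat := by
        rw [hpn] at hdvd; exact_mod_cast hdvd
      have hsq' : m * m ≤ p.toNat := by
        rw [hpn] at hsq; exact_mod_cast hsq
      exact (Nat.prime_def_le_sqrt.mp hpr).2 m hm (Nat.le_sqrt.mpr hsq') hdvd' 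

theorem bStep_PL (m : Nat) (hm : 2 ≤ m) : bStep (PL m) ((m : Nat) : Int) = PL (m + 1) := by
  unfold bStep
  by_cases hp : Nat.Prime m
  · have hall : ((PL m).filter (fun q => decide (q * q ≤ ((m : Nat) : Int)))).all
        (fun q => PySem.Int.mod ((m : Nat) : Int) q != 0) = true := by
      rw [List.all_eq_true]
      intro q hq
      rcases mem_PL (List.mem_of_mem_filter hq) with ⟨r, hrpr, hrlt, rfl⟩
      have hnd : ¬ r ∣ m := by
        intro hd
        rcases (Nat.Prime.eq_one_or_self_of_dvd hp r hd) with h | h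
        · exact hrpr.one_lt.ne' h
        · omega
      have hmod : m % r ≠ 0 := fun h => hnd (Nat.dvd_iff_mod_eq_zero.mpr h)
      simp only [PySem.Int.mod_natCast, bne_iff_ne, ne_eq, Int.natCast_eq_zero]
      exact hmod
    rw [if_pos hall, PL_succ, if_pos hp]
  · rw [if_neg, PL_succ, if_neg hp, List.append_nil]
    rw [List.all_eq_true]
    intro hall
    set q := m.minFac with hq
    have hqpr : q.Prime := Nat.minFac_prime (by omega)
    have hqd : q ∣ m := Nat.minFac_dvd m
    have hqsq : q * q ≤ m := by
      have := Nat.minFac_sq_le_self (by omega) hp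
      simpa [pow_two] using this
    have hqlt : q < m := by
      have hle : q ≤ m := Nat.le_of_dvd (by omega) hqd
      rcases Nat.lt_or_ge q m with h | h
      · exact h
      · exfalso; apply hp
        have : q = m := by omega
        exact this ▸ hqpr
    have hmem : ((q : Nat) : Int) ∈ (PL m).filter (fun x => decide (x * x ≤ ((m : Nat) : Int))) := by
      apply List.mem_filter.mpr
      refine ⟨PL_mem_of_prime hqpr hqlt, ?_⟩
      simp only [decide_eq_true_eq]
      exact_mod_cast hqsq
    have := hall _ hmem
    rw [PySem.Int.mod_natCast] at this
    simp only [bne_iff_ne, ne_eq] at this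
    apply this
    exact_mod_cast congrArg (fun n => ((n : Nat) : Int)) (Nat.dvd_iff_mod_eq_zero.mp hqd)

theorem fold_PL : ∀ k : Nat, (PySem.List.pyRange 2 (2 + (k : Int)) 1).foldl bStep [] = PL (2 + k) := by
  intro k
  induction k with
  | zero =>
    rw [show ((2 : Int) + (0 : Nat)) = 2 by norm_num, PySem.List.pyRange_one_eq_nil (le_refl 2)]
    decide
  | succ k ih =>
    have hsplit : PySem.List.pyRange 2 (2 + ((k + 1 : Nat) : Int)) 1
        = PySem.List.pyRange 2 (2 + (k : Int)) 1 ++ [2 + (k : Int)] := by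
      rw [show (2 : Int) + ((k + 1 : Nat) : Int) = (2 + (k : Int)) + 1 by push_cast; ring]
      exact PySem.List.pyRange_one_succ_right (by omega)
    rw [hsplit, List.foldl_append, ih]
    simp only [List.foldl_cons, List.foldl_nil]
    rw [show (2 : Int) + (k : Int) = (((2 + k : Nat) : Nat) : Int) by push_cast; ring,
        bStep_PL (2 + k) (by omega)]
    rw [Nat.add_assoc]

theorem charB (p : Int) :
    p_index_alt p = if p.toNat.Prime then ((PL (p.toNat + 1)).length : Int) else -1 := by
  unfold p_index_alt
  by_cases hp2 : 2 ≤ p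
  · have hpcast : p + 1 = 2 + ((p.toNat - 1 : Nat) : Int) := by omega
    have hfold : (PySem.List.pyRange 2 (p + 1) 1).foldl bStep [] = PL (p.toNat + 1) := by
      rw [hpcast, fold_PL]
      congr 1
      omega
    rw [hfold]
    show (match (PL (p.toNat + 1)).getLast? with
      | some q => if q = p then PySem.List.len (PL (p.toNat + 1)) else -1
      | none => -1)
      = if p.toNat.Prime then ((PL (p.toNat + 1)).length : Int) else -1
    by_cases hpr : p.toNat.Prime
    · have hsucc : PL (p.toNat + 1) = PL p.toNat ++ [((p.toNat : Nat) : Int)] := by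
        rw [PL_succ, if_pos hpr]
      have hcast : ((p.toNat : Nat) : Int) = p := by omega
      rw [if_pos hpr, hsucc, List.getLast?_concat]
      simp [hcast, PySem.List.len_eq]
    · rw [if_neg hpr]
      rcases hlast : (PL (p.toNat + 1)).getLast? with _ | q
      · rfl
      · rcases mem_PL (List.mem_of_getLast? hlast) with ⟨r, hrpr, hrlt, rfl⟩
        have hne : ((r : Nat) : Int) ≠ p := by
          intro h
          have : r = p.toNat := by omega
          exact hpr (this ▸ hrpr)
        simp [hne]
  · have hnil : PySem.List.pyRange 2 (p + 1) 1 = [] := PySem.List.pyRange_one_eq_nil (by omega)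
    have hnpr : ¬ p.toNat.Prime := by
      have h01 : p.toNat = 0 ∨ p.toNat = 1 := by omega
      rcases h01 with h | h <;> rw [h] <;> decide
    rw [hnil, if_neg hnpr]
    rfl

theorem nextPrimeLoop_eq : ∀ (f : Nat) (s t : Int), s ≤ t → t < s + (f : Int) →
    is_prime t = true → (∀ r, s ≤ r → r < t → is_prime r = false) → nextPrimeLoop f s = t := by
  intro f
  induction f with
  | zero => intro s t h1 h2 _ _; exfalso; omega
  | succ f ih =>
    intro s t h1 h2 ht hmin
    simp only [nextPrimeLoop]
    by_cases hs : is_prime s = true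
    · rw [if_pos hs]
      rcases eq_or_lt_of_le h1 with h | h
      · exact h
      · exact absurd hs (by rw [hmin s (le_refl s) h]; simp)
    · rw [if_neg (by simpa using hs)]
      have hst : s ≠ t := fun h => hs (h ▸ ht)
      exact ih (s + 1) t (by omega) (by push_cast at h2 ⊢; omega) ht
        (fun r hr1 hr2 => hmin r (by omega) hr2)

theorem PL_between (a : Nat) : ∀ d : Nat, (∀ m, a + 1 ≤ m → m < a + 1 + d → ¬ Nat.Prime m) →
    PL (a + 1 + d) = PL (a + 1) := by
  intro d
  induction d with
  | zero => intro _; rfl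
  | succ d ih =>
    intro h
    rw [show a + 1 + (d + 1) = (a + 1 + d) + 1 by omega, PL_succ,
        if_neg (h _ (by omega) (by omega)), List.append_nil]
    exact ih (fun m h1 h2 => h m h1 (by omega))

theorem pIndexLoop_eq (p : Int) (hp : 2 ≤ p) :
    ∀ k : Nat, ∀ a idx : Int, (p - a).toNat = k → 2 ≤ a → a.toNat.Prime →
      idx = ((PL (a.toNat + 1)).length : Int) → (p.toNat.Prime → a ≤ p) →
      pIndexLoop p a idx = if p.toNat.Prime then ((PL (p.toNat + 1)).length : Int) else -1 := by
  intro k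
  induction k using Nat.strong_induction_on with
  | _ k IH =>
  intro a idx hk ha2 hapr hidx hle
  rw [pIndexLoop]
  by_cases hlt : a < p
  · rw [if_pos hlt]
    have hA2 : 2 ≤ a.toNat := by omega
    have haA : a = ((a.toNat : Nat) : Int) := by omega
    have hex : ∃ q, a.toNat < q ∧ Nat.Prime q := by
      obtain ⟨q, hq1, hq2⟩ := Nat.exists_infinite_primes (a.toNat + 1)
      exact ⟨q, by omega, hq2⟩
    have hbspec := Nat.find_spec hex
    have hbmin : ∀ r, r < Nat.find hex → ¬(a.toNat < r ∧ Nat.Prime r) :=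
      fun r hr => Nat.find_min hex hr
    have hb2A : Nat.find hex ≤ 2 * a.toNat := by
      obtain ⟨q, hqpr, hq1, hq2⟩ := Nat.bertrand a.toNat (by omega)
      have := Nat.find_min' hex ⟨hq1, hqpr⟩
      omega
    have hb2 : 2 ≤ ((Nat.find hex : Nat) : Int) := by
      have := hbspec.2.two_le; omega
    have hnp : next_prime a = ((Nat.find hex : Nat) : Int) := by
      unfold next_prime
      apply nextPrimeLoop_eq
      · omega
      · omega
      · rw [isPrime_iff]
        refine ⟨hb2, ?_⟩
        rw [Int.toNat_natCast]
        exact hbspec.2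
      · intro r hr1 hr2
        by_contra hcon
        have hrtrue : is_prime r = true := by
          cases h : is_prime r
          · exact absurd h hcon
          · rfl
        rcases (isPrime_iff r).mp hrtrue with ⟨hr2', hrpr⟩
        exact hbmin r.toNat (by omega) ⟨by omega, hrpr⟩
    rw [hnp]
    have hPLb : PL (Nat.find hex + 1) = PL (a.toNat + 1) ++ [((Nat.find hex : Nat) : Int)] := by
      have hbetween : PL (a.toNat + 1 + (Nat.find hex - a.toNat - 1)) = PL (a.toNat + 1) :=
        PL_between a.toNat _ (fun m h1 h2 hpr =>
          hbmin m (by omega) ⟨by omega, hpr⟩)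
      rw [show Nat.find hex + 1 = (a.toNat + 1 + (Nat.find hex - a.toNat - 1)) + 1 by omega,
          PL_succ, hbetween,
          show a.toNat + 1 + (Nat.find hex - a.toNat - 1) = Nat.find hex by omega,
          if_pos hbspec.2]
    apply IH ((p - ((Nat.find hex : Nat) : Int)).toNat) (by omega) _ _ rfl hb2
    · rw [Int.toNat_natCast]; exact hbspec.2
    · rw [Int.toNat_natCast, hPLb, List.length_append, hidx]
      simp
    · intro hppr
      have hptoNat : a.toNat < p.toNat := by omega
      have := Nat.find_min' hex ⟨hptoNat, hppr⟩
      omega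
  · rw [if_neg hlt]
    by_cases heq : p = a
    · rw [if_pos heq]
      have hppr : p.toNat.Prime := by rw [heq]; exact hapr
      rw [if_pos hppr, hidx, heq]
    · rw [if_neg heq]
      have hnpr : ¬ p.toNat.Prime := fun h => absurd (hle h) (by omega)
      rw [if_neg hnpr]

theorem charA (p : Int) :
    p_index p = if p.toNat.Prime then ((PL (p.toNat + 1)).length : Int) else -1 := by
  unfold p_index
  by_cases hp : 2 ≤ p
  · exact pIndexLoop_eq p hp (p - 2).toNat 2 1 rfl (le_refl 2) (by decide) (by decide)
      (fun _ => hp)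
  · rw [pIndexLoop, if_neg (by omega), if_neg (by omega)]
    have hnpr : ¬ p.toNat.Prime := by
      have h01 : p.toNat = 0 ∨ p.toNat = 1 := by omega
      rcases h01 with h | h <;> rw [h] <;> decide
    rw [if_neg hnpr]

-- ===== VERDICT (by name: the statement is the Claim_ definition above) =====
theorem p_index_spec : Claim_equal_p_index := by
  intro p _
  unfold Spec_p_index
  rw [charA, charB]
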